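-- pv_equiv track=rewrite | github.com/MaloKerrand/adventofcode | 2024/23/main_2.py | n_plus_1_cliques
-- ===== SOURCE A (Python) =====
-- def n_plus_1_cliques(cliques: set[tuple[str, ...]], graph: dict[str, set[str]]) -> set[tuple[str, ...]]:
--     new_cliques: set[tuple[str, ...]] = set()
--     for clique in cliques:
--         for c, connections in graph.items():
--             if c in clique:
--                 continue
--             if len(set(clique).difference(connections)) != 0:
--                 continue
--             new_cliques.add(tuple(sorted((*clique, c))))
--     return new_cliques
-- ===== SOURCE B (Python) =====
-- def n_plus_1_cliques(cliques: set[tuple[str, ...]], graph: dict[str, set[str]]) -> set[tuple[str, ...]]: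
--     # Reverse adjacency: rev[m] = set of nodes c whose adjacency set contains m.
--     rev: dict[str, set[str]] = {}
--     for c, connections in graph.items():
--         for m in connections:
--             rev.setdefault(m, set()).add(c)
--     empty: set[str] = set()
--     keys = list(graph)
--     new_cliques: set[tuple[str, ...]] = set()
--     for clique in cliques:
--         # Candidate extension nodes: intersection of rev[m] over the clique's members.
--         cands = keys
--         for m in clique:
--             r = rev.get(m, empty)
--             cands = [c for c in cands if c in r]
--         for c in cands:
--             if c not in clique:
--                 new_cliques.add(tuple(sorted((*clique, c))))
--     return new_cliques
-- ===== Notes on version B (the rewrite author's own statement) =====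
-- stated objective: faster
-- what changed: Instead of testing every graph entry against every clique with a per-pair set difference, B builds a reverse-adjacency index once and, per clique, intersects the index entries of the clique's members to get the extension candidates directly.
import Mathlib
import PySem

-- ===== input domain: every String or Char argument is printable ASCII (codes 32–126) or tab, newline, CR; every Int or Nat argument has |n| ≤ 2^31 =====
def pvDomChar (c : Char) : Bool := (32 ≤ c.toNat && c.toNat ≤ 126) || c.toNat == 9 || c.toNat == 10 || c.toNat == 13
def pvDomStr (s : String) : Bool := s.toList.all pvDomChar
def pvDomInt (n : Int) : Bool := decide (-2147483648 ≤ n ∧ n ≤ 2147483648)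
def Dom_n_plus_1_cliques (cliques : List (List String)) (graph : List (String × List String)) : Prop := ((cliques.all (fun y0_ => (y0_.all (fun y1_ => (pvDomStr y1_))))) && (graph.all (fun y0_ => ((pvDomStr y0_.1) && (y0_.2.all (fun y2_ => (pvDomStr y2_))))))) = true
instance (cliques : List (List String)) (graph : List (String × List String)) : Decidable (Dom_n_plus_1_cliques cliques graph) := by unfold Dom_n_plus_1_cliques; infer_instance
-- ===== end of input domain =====

-- B replaces A's per-clique scan of every graph entry (with a set-difference test per entry)
-- by a reverse-adjacency index built once, intersecting rev[m] over the clique's members; objective: faster.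
-- Python A/B iterate a set of cliques (hash order); as the result is a set, it does not depend
-- on that order, and both ports iterate the given list in order.

-- ===== PORT A =====
def n_plus_1_cliques (cliques : List (List String)) (graph : List (String × List String)) : List (List String) :=
  let g := PySem.Dict.ofList graph
  cliques.foldl (fun new_cliques clique =>
    g.items.foldl (fun new_cliques p =>
      if clique.contains p.1 then new_cliques
      else if PySem.Set.len (PySem.Set.diff (PySem.Set.ofList clique) p.2) ≠ 0 then new_cliques
      else PySem.Set.add new_cliques (PySem.List.sorted (clique ++ [p.1]) id)) new_cliques) []

-- ===== PORT B =====
def pvRev (g : PySem.Dict String (List String)) : PySem.Dict String (List String) :=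
  g.items.foldl (fun rev p =>
    p.2.foldl (fun rev m => rev.modify m [] (fun s => PySem.Set.add s p.1)) rev) PySem.Dict.empty

def n_plus_1_cliques_alt (cliques : List (List String)) (graph : List (String × List String)) : List (List String) :=
  let g := PySem.Dict.ofList graph
  let rev := pvRev g
  cliques.foldl (fun new_cliques clique =>
    let cands := clique.foldl (fun cands m => cands.filter (fun c => (rev.getD m []).contains c)) g.keys
    cands.foldl (fun new_cliques c =>
      if clique.contains c then new_cliques
      else PySem.Set.add new_cliques (PySem.List.sorted (clique ++ [c]) id)) new_cliques) []

-- ===== PRECONDITION & SPEC =====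
def Spec_n_plus_1_cliques (cliques : List (List String)) (graph : List (String × List String)) (out : List (List String)) : Prop := out = n_plus_1_cliques_alt cliques graph
instance (cliques : List (List String)) (graph : List (String × List String)) (out : List (List String)) : Decidable (Spec_n_plus_1_cliques cliques graph out) := by unfold Spec_n_plus_1_cliques; infer_instance

-- ===== CLAIM (what is proved, stated in full; the proofs are below) =====
def Claim_equal_n_plus_1_cliques : Prop := ∀ (cliques : List (List String)) (graph : List (String × List String)), Dom_n_plus_1_cliques cliques graph → Spec_n_plus_1_cliques cliques graph (n_plus_1_cliques cliques graph)

-- ===== LEMMAS AND PROOFS =====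

-- membership in the reverse index, inner loop
theorem pv_mem_inner_rev (conns : List String) (c : String)
    (d : PySem.Dict String (List String)) (m x : String) :
    x ∈ (conns.foldl (fun rev m' => rev.modify m' [] (fun s => PySem.Set.add s c)) d).getD m []
      ↔ x ∈ d.getD m [] ∨ (x = c ∧ m ∈ conns) := by
  induction conns generalizing d with
  | nil => simp
  | cons a t ih =>
    simp only [List.foldl_cons, ih]
    by_cases h : m = a
    · subst h
      rw [PySem.Dict.getD_modify_self, PySem.Set.mem_add]
      simp; tauto
    · rw [PySem.Dict.getD_modify_of_ne _ _ _ h]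
      simp only [List.mem_cons]
      tauto

-- membership in the reverse index, outer loop
theorem pv_mem_rev (l : List (String × List String))
    (d : PySem.Dict String (List String)) (m x : String) :
    x ∈ (l.foldl (fun rev p =>
        p.2.foldl (fun rev m' => rev.modify m' [] (fun s => PySem.Set.add s p.1)) rev) d).getD m []
      ↔ x ∈ d.getD m [] ∨ ∃ p ∈ l, p.1 = x ∧ m ∈ p.2 := by
  induction l generalizing d with
  | nil => simp
  | cons a t ih =>
    simp only [List.foldl_cons, ih, pv_mem_inner_rev]
    simp; tauto

theorem pv_mem_pvRev (g : PySem.Dict String (List String)) (m x : String) :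
    x ∈ (pvRev g).getD m [] ↔ ∃ p ∈ g.items, p.1 = x ∧ m ∈ p.2 := by
  unfold pvRev
  rw [pv_mem_rev]
  simp [PySem.Dict.getD_empty]

-- a chain of filters is one filter by the conjunction
theorem pv_foldl_filter {α β : Type} (q : β → α → Bool) (clique : List β) (keys : List α) :
    clique.foldl (fun cs m => cs.filter (q m)) keys
      = keys.filter (fun c => clique.all (fun m => q m c)) := by
  induction clique generalizing keys with
  | nil => simp
  | cons a t ih =>
    simp only [List.foldl_cons, ih, List.filter_filter]
    apply List.filter_congr
    intro x _
    simp [Bool.and_comm]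

-- a guarded Set.add loop is a Set.add fold over the filtered, mapped list
theorem pv_foldl_add_if {α β : Type} [BEq β] (p : α → Bool) (f : α → β)
    (l : List α) (s : PySem.Set β) :
    l.foldl (fun acc x => if p x then PySem.Set.add acc (f x) else acc) s
      = ((l.filter p).map f).foldl PySem.Set.add s := by
  induction l generalizing s with
  | nil => rfl
  | cons a t ih =>
    by_cases h : p a <;> simp [h, ih]

-- the per-clique bodies of A and B agree
theorem pv_step_eq (graph : List (String × List String))
    (new_cliques : List (List String)) (clique : List String) :
    (let g := PySem.Dict.ofList graph
     g.items.foldl (fun new_cliques p =>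
      if clique.contains p.1 then new_cliques
      else if PySem.Set.len (PySem.Set.diff (PySem.Set.ofList clique) p.2) ≠ 0 then new_cliques
      else PySem.Set.add new_cliques (PySem.List.sorted (clique ++ [p.1]) id)) new_cliques)
    = (let g := PySem.Dict.ofList graph
       let rev := pvRev g
       let cands := clique.foldl (fun cands m => cands.filter (fun c => (rev.getD m []).contains c)) g.keys
       cands.foldl (fun new_cliques c =>
        if clique.contains c then new_cliques
        else PySem.Set.add new_cliques (PySem.List.sorted (clique ++ [c]) id)) new_cliques) := by
  simp only []
  set g := PySem.Dict.ofList graph with hg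
  -- rewrite A's two-branch body as one guard
  have hA : (fun (acc : List (List String)) (p : String × List String) =>
      if clique.contains p.1 then acc
      else if PySem.Set.len (PySem.Set.diff (PySem.Set.ofList clique) p.2) ≠ 0 then acc
      else PySem.Set.add acc (PySem.List.sorted (clique ++ [p.1]) id))
      = (fun acc p =>
      if (!clique.contains p.1 && (PySem.Set.diff (PySem.Set.ofList clique) p.2).isEmpty) then
        PySem.Set.add acc (PySem.List.sorted (clique ++ [p.1]) id) else acc) := by
    funext acc p
    have hlen : (PySem.Set.len (PySem.Set.diff (PySem.Set.ofList clique) p.2) ≠ 0)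
        ↔ ((PySem.Set.ofList clique).diff p.2).isEmpty = false := by
      simp only [PySem.Set.len, List.isEmpty_eq_false_iff, ← List.length_pos_iff]
      omega
    by_cases h1 : clique.contains p.1
    · rw [List.contains_iff_mem] at h1
      simp [h1]
    · rw [List.contains_iff_mem] at h1
      by_cases h2 : PySem.Set.len (PySem.Set.diff (PySem.Set.ofList clique) p.2) ≠ 0
      · have hne : PySem.Set.diff (PySem.Set.ofList clique) p.2 ≠ [] := by
          have := hlen.1 h2
          simpa [List.isEmpty_eq_false_iff] using this
        simp [h1, hne]
      · have heq : PySem.Set.diff (PySem.Set.ofList clique) p.2 = [] := by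
          rw [← List.length_eq_zero_iff]
          simp only [PySem.Set.len, ne_eq, not_not] at h2
          omega
        simp [h1, heq]
  have hB : (fun (acc : List (List String)) (c : String) =>
      if clique.contains c then acc
      else PySem.Set.add acc (PySem.List.sorted (clique ++ [c]) id))
      = (fun acc c =>
      if !clique.contains c then PySem.Set.add acc (PySem.List.sorted (clique ++ [c]) id) else acc) := by
    funext acc c
    by_cases h1 : clique.contains c <;>
      rw [List.contains_iff_mem] at h1 <;> simp [h1]
  rw [hA, pv_foldl_add_if, pv_foldl_filter, hB, pv_foldl_add_if, List.filter_filter]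
  -- B's key list, pushed through the map to items
  rw [show PySem.Dict.keys g = g.items.map (fun p => p.1) from rfl, List.filter_map,
      List.map_map]
  congr 1
  apply congrArg
  apply List.filter_congr
  intro p hp
  simp only [Function.comp]
  have hkey : g.get? p.1 = some p.2 :=
    PySem.Dict.get?_of_mem_items g hp (PySem.Dict.nodup_keys_ofList graph)
  have hmem : ∀ m : String, p.1 ∈ (pvRev g).getD m [] ↔ m ∈ p.2 := by
    intro m
    rw [pv_mem_pvRev]
    constructor
    · rintro ⟨q, hq, hq1, hq2⟩
      have hq' : g.get? q.1 = some q.2 :=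
        PySem.Dict.get?_of_mem_items g hq (PySem.Dict.nodup_keys_ofList graph)
      rw [hq1, hkey] at hq'
      injection hq' with h
      rwa [h]
    · intro h; exact ⟨p, hp, rfl, h⟩
  have hdiff : List.isEmpty (PySem.Set.diff (PySem.Set.ofList clique) p.2) = true
      ↔ ∀ m ∈ clique, m ∈ p.2 := by
    rw [List.isEmpty_iff]
    unfold PySem.Set.diff
    rw [List.filter_eq_nil_iff]
    constructor
    · intro h m hm'
      have := h m ((PySem.Set.mem_ofList clique m).2 hm')
      simpa using this
    · intro h m hm'
      have := h m ((PySem.Set.mem_ofList clique m).1 hm')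
      simpa using this
  have hall : (clique.all fun m => ((pvRev g).getD m []).contains p.1) = true
      ↔ ∀ m ∈ clique, m ∈ p.2 := by
    simp only [List.all_eq_true, List.contains_iff_mem]
    constructor
    · intro h m hm'; exact (hmem m).1 (h m hm')
    · intro h m hm'; exact (hmem m).2 (h m hm')
  by_cases hm : p.1 ∈ clique
  · simp [hm]
  · have hc : clique.contains p.1 = false := by
      simpa [List.contains_iff_mem] using hm
    rw [hc]
    simp only [Bool.not_false, Bool.true_and]
    exact Bool.eq_iff_iff.2 (hdiff.trans hall.symm)

theorem pv_main (cliques : List (List String)) (graph : List (String × List String)) :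
    n_plus_1_cliques cliques graph = n_plus_1_cliques_alt cliques graph := by
  unfold n_plus_1_cliques n_plus_1_cliques_alt
  simp only []
  induction cliques using List.reverseRecOn with
  | nil => rfl
  | append_singleton t clique ih =>
    rw [List.foldl_append, List.foldl_append, ih]
    simp only [List.foldl_cons, List.foldl_nil]
    exact pv_step_eq graph _ clique

-- ===== VERDICT (by name: the statement is the Claim_ definition above) =====
theorem n_plus_1_cliques_spec : Claim_equal_n_plus_1_cliques := by
  intro cliques graph _
  exact pv_main cliques graph
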